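-- pv_equiv track=rewrite | github.com/ka-sk/ZTO7 | second.py | calculate_completion_times
-- ===== SOURCE A (Python) =====
-- def calculate_completion_times(pi, p):
--     n = len(pi)
--     C = [[0 for _ in range(n)] for _ in range(3)]
--
--     for j in range(n):
--         for i in range(3):
--             if j == 0 and i == 0:
--                 C[i][j] = p[i][pi[j]]
--             elif j == 0 and i > 0:
--                 C[i][j] = C[i - 1][j] + p[i][pi[j]]
--             elif j > 0 and i == 0:
--                 C[i][j] = C[i][j - 1] + p[i][pi[j]]
--             else:
--                 C[i][j] = max(C[i - 1][j], C[i][j - 1]) + p[i][pi[j]]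
--
--     return C
-- ===== SOURCE B (Python) =====
-- def calculate_completion_times(pi, p):
--     # Critical-path formulation: C[i][j] = S_i[j] + max_{k<=j}(C[i-1][k] - S_i[k-1]),
--     # where S_i is the prefix sum of machine i's processing times in order pi.
--     # Computed with one prefix-sum pass and one running-maximum pass per machine.
--     n = len(pi)
--     rows = []
--     prev = None
--     for i in range(3):
--         S = []
--         s = 0
--         for j in range(n):
--             s += p[i][pi[j]]
--             S.append(s)
--         if prev is None:
--             row = S
--         else:
--             row = []
--             best = None
--             for j in range(n):
--                 cand = prev[j] - (S[j - 1] if j > 0 else 0)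
--                 if best is None or cand > best:
--                     best = cand
--                 row.append(S[j] + best)
--         rows.append(row)
--         prev = row
--     return rows
-- ===== Notes on version B (the rewrite author's own statement) =====
-- stated objective: alternative
-- what changed: B uses the critical-path closed form C[i][j] = S_i[j] + max_{k<=j}(C[i-1][k] - S_i[k-1]) of the flowshop recurrence: per machine it builds a prefix-sum list and then a single running-maximum pass, instead of A's cellwise max(up,left)+p fill of a preallocated 3xn table.
import Mathlib
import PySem

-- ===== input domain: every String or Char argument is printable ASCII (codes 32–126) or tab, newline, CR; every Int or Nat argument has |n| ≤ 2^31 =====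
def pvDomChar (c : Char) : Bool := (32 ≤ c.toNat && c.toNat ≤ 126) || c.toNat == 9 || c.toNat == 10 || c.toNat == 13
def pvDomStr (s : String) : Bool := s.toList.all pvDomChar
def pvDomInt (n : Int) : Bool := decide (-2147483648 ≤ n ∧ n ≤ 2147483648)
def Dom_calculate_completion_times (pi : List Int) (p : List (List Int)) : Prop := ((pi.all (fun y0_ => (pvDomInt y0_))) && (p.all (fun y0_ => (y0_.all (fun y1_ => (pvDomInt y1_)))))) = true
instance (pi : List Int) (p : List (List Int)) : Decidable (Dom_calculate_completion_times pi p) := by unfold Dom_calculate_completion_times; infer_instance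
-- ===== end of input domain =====

-- B computes the table via the critical-path closed form C[i][j] = S_i[j] + max_{k≤j}(C[i-1][k] − S_i[k−1])
-- (prefix sums plus a running maximum per machine) instead of A's cellwise max(up,left)+p fill; same cost.

-- p[i][pi[j]] : both Pythons read the matrix this way (negative pi entries wrap, per Python)
def pvAt (p : List (List Int)) (pi : List Int) (i j : Nat) : Int :=
  (PySem.List.pyGet? (p.getD i []) (pi.getD j 0)).getD 0

-- ===== PORT A =====
-- body of A's inner loop: the four-way branch writing C[i][j]
def aCell (e : Nat → Nat → Int) (j : Nat) (C : List (List Int)) (i : Nat) : List (List Int) :=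
  let v : Int :=
    if j == 0 && i == 0 then e i j
    else if j == 0 && i > 0 then (C.getD (i - 1) []).getD j 0 + e i j
    else if j > 0 && i == 0 then (C.getD i []).getD (j - 1) 0 + e i j
    else max ((C.getD (i - 1) []).getD j 0) ((C.getD i []).getD (j - 1) 0) + e i j
  C.set i ((C.getD i []).set j v)

-- inner loop of A: 'for i in range(3)' filling column j of C in place
def aCol (e : Nat → Nat → Int) (j : Nat) (C : List (List Int)) : List (List Int) :=
  (List.range 3).foldl (aCell e j) C

def calculate_completion_times (pi : List Int) (p : List (List Int)) : List (List Int) :=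
  let n := pi.length
  let C0 : List (List Int) := (List.range 3).map (fun _ => (List.range n).map (fun _ => (0 : Int)))
  (List.range n).foldl (fun C j => aCol (pvAt p pi) j C) C0

-- ===== PORT B =====
-- B's prefix-sum pass for machine i: S[j] = p[i][pi[0]] + … + p[i][pi[j]]
def pvPrefix (e : Nat → Nat → Int) (i n : Nat) : List Int :=
  ((List.range n).foldl (fun (st : List Int × Int) j =>
    (st.1 ++ [st.2 + e i j], st.2 + e i j)) ([], 0)).1

-- B's running-maximum pass: row[j] = S[j] + max_{k≤j}(prev[k] − S[k−1]) ('best' starts as None)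
def pvRowFromPrev (n : Nat) (prev S : List Int) : List Int :=
  ((List.range n).foldl (fun (st : List Int × Option Int) j =>
    let cand := prev.getD j 0 - (if j > 0 then S.getD (j - 1) 0 else 0)
    let best := match st.2 with
      | none => cand
      | some b => if cand > b then cand else b
    (st.1 ++ [S.getD j 0 + best], some best)) ([], none)).1

def calculate_completion_times_alt (pi : List Int) (p : List (List Int)) : List (List Int) :=
  let n := pi.length
  (((List.range 3).foldl (fun (st : List (List Int) × Option (List Int)) i =>
      let S := pvPrefix (pvAt p pi) i n
      let row := match st.2 with
        | none => S
        | some prev => pvRowFromPrev n prev S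
      (st.1 ++ [row], some row)) ([], none)).1)

-- ===== PRECONDITION & SPEC =====
-- Pre_ excludes exactly the inputs where Python A raises IndexError (fewer than 3
-- machine rows, or some pi entry out of range of a used row); A returns nowhere outside it.
def Pre_calculate_completion_times (pi : List Int) (p : List (List Int)) : Prop :=
  pi = [] ∨ (2 < p.length ∧ ∀ x ∈ pi, ∀ row ∈ p.take 3, -(row.length : Int) ≤ x ∧ x < (row.length : Int))
instance (pi : List Int) (p : List (List Int)) : Decidable (Pre_calculate_completion_times pi p) := by
  unfold Pre_calculate_completion_times; infer_instance

def pvWitness_calculate_completion_times : List Int × List (List Int) :=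
  ([1, 0, -1], [[2, 3], [1, 4], [5, 2]])

def Spec_calculate_completion_times (pi : List Int) (p : List (List Int)) (out : List (List Int)) : Prop := out = calculate_completion_times_alt pi p
instance (pi : List Int) (p : List (List Int)) (out : List (List Int)) : Decidable (Spec_calculate_completion_times pi p out) := by unfold Spec_calculate_completion_times; infer_instance

-- ===== CLAIM (what is proved, stated in full; the proofs are below) =====
def Claim_equal_calculate_completion_times : Prop := ∀ (pi : List Int) (p : List (List Int)), Dom_calculate_completion_times pi p → Pre_calculate_completion_times pi p → Spec_calculate_completion_times pi p (calculate_completion_times pi p)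

-- ===== LEMMAS AND PROOFS =====

-- the recurrence A computes
def cval (e : Nat → Nat → Int) : Nat → Nat → Int
  | 0, 0 => e 0 0
  | i + 1, 0 => cval e i 0 + e (i + 1) 0
  | 0, j + 1 => cval e 0 j + e 0 (j + 1)
  | i + 1, j + 1 => max (cval e i (j + 1)) (cval e (i + 1) j) + e (i + 1) (j + 1)

-- prefix sums of machine i's row
def pvS (e : Nat → Nat → Int) (i : Nat) : Nat → Int
  | 0 => e i 0
  | j + 1 => pvS e i j + e i (j + 1)

-- running maximum of (cval e i k − pvS e (i+1) (k−1)) for k ≤ j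
def pvM (e : Nat → Nat → Int) (i : Nat) : Nat → Int
  | 0 => cval e i 0
  | j + 1 =>
    let cand := cval e i (j + 1) - pvS e (i + 1) j
    if cand > pvM e i j then cand else pvM e i j

-- partially filled row i after the first k columns of A's fill
def gRow (e : Nat → Nat → Int) (n k i : Nat) : List Int :=
  (List.range n).map (fun j => if j < k then cval e i j else 0)

theorem getD_map_range (n j : Nat) (f : Nat → Int) (d : Int) :
    (((List.range n).map f).getD j d) = if j < n then f j else d := by
  by_cases h : j < n
  · rw [List.getD_eq_getElem?_getD, List.getElem?_map, List.getElem?_range h]; simp [h]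
  · rw [List.getD_eq_getElem?_getD, List.getElem?_map,
      List.getElem?_eq_none (by simpa using Nat.le_of_not_lt h)]
    rw [if_neg h]
    rfl

theorem set_map_range (n k : Nat) (f : Nat → Int) (v : Int) :
    ((List.range n).map f).set k v = (List.range n).map (fun j => if j = k then v else f j) := by
  apply List.ext_getElem
  · simp
  · intro i h1 h2
    simp only [List.getElem_set, List.getElem_map, List.getElem_range]
    by_cases h : i = k
    · rw [if_pos (by omega), if_pos h]
    · rw [if_neg (by omega), if_neg h]

theorem gRow_set (e : Nat → Nat → Int) (n k i : Nat) (hk : k < n) :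
    (gRow e n k i).set k (cval e i k) = gRow e n (k + 1) i := by
  unfold gRow
  rw [set_map_range]
  apply List.map_congr_left
  intro j hj
  by_cases h1 : j = k
  · subst h1; simp
  · by_cases h2 : j < k
    · rw [if_neg h1, if_pos h2, if_pos (by omega)]
    · rw [if_neg h1, if_neg h2, if_neg (by omega)]

theorem gRow_getD (e : Nat → Nat → Int) (n K i j : Nat) (h1 : j < n) (h2 : j < K) :
    (gRow e n K i).getD j 0 = cval e i j := by
  unfold gRow; rw [getD_map_range, if_pos h1, if_pos h2]

theorem a_col_step (e : Nat → Nat → Int) (n k : Nat) (hk : k < n) :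
    aCol e k [gRow e n k 0, gRow e n k 1, gRow e n k 2]
    = [gRow e n (k + 1) 0, gRow e n (k + 1) 1, gRow e n (k + 1) 2] := by
  have hr : List.range 3 = [0, 1, 2] := rfl
  have h0 : aCell e k [gRow e n k 0, gRow e n k 1, gRow e n k 2] 0
      = [gRow e n (k + 1) 0, gRow e n k 1, gRow e n k 2] := by
    cases k with
    | zero =>
      show (([gRow e n 0 0, gRow e n 0 1, gRow e n 0 2].set 0
        ((gRow e n 0 0).set 0 (e 0 0))) = _)
      rw [show (e 0 0) = cval e 0 0 by simp [cval], gRow_set e n 0 0 hk]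
      rfl
    | succ k' =>
      show (([gRow e n (k'+1) 0, gRow e n (k'+1) 1, gRow e n (k'+1) 2].set 0
        ((gRow e n (k'+1) 0).set (k'+1)
          (if (decide (k'+1 > 0) && (0 == 0)) = true then
            (gRow e n (k'+1) 0).getD (k'+1-1) 0 + e 0 (k'+1)
           else max ((gRow e n (k'+1) (0-1)).getD (k'+1) 0) ((gRow e n (k'+1) 0).getD (k'+1-1) 0) + e 0 (k'+1)))) = _)
      rw [if_pos (by simp)]
      rw [show k'+1-1 = k' from rfl, gRow_getD e n (k'+1) 0 k' (by omega) (by omega)]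
      rw [show cval e 0 k' + e 0 (k'+1) = cval e 0 (k'+1) by simp [cval], gRow_set e n (k'+1) 0 hk]
      rfl
  have h1 : aCell e k [gRow e n (k + 1) 0, gRow e n k 1, gRow e n k 2] 1
      = [gRow e n (k + 1) 0, gRow e n (k + 1) 1, gRow e n k 2] := by
    cases k with
    | zero =>
      show ([gRow e n 1 0, gRow e n 0 1, gRow e n 0 2].set 1
        ((gRow e n 0 1).set 0 ((gRow e n 1 0).getD 0 0 + e 1 0))) = _
      rw [gRow_getD e n 1 0 0 hk (by omega)]
      rw [show cval e 0 0 + e 1 0 = cval e 1 0 by simp [cval], gRow_set e n 0 1 hk]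
      rfl
    | succ k' =>
      show ([gRow e n (k'+1+1) 0, gRow e n (k'+1) 1, gRow e n (k'+1) 2].set 1
        ((gRow e n (k'+1) 1).set (k'+1)
          (if (decide (k'+1 > 0) && (1 == 0)) = true then
            (gRow e n (k'+1) 1).getD (k'+1-1) 0 + e 1 (k'+1)
           else max ((gRow e n (k'+1+1) 0).getD (k'+1) 0) ((gRow e n (k'+1) 1).getD (k'+1-1) 0) + e 1 (k'+1)))) = _
      rw [if_neg (by simp)]
      rw [show k'+1-1 = k' from rfl, gRow_getD e n (k'+1+1) 0 (k'+1) hk (by omega),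
        gRow_getD e n (k'+1) 1 k' (by omega) (by omega)]
      rw [show max (cval e 0 (k'+1)) (cval e 1 k') + e 1 (k'+1) = cval e 1 (k'+1) by simp [cval],
        gRow_set e n (k'+1) 1 hk]
      rfl
  have h2 : aCell e k [gRow e n (k + 1) 0, gRow e n (k + 1) 1, gRow e n k 2] 2
      = [gRow e n (k + 1) 0, gRow e n (k + 1) 1, gRow e n (k + 1) 2] := by
    cases k with
    | zero =>
      show ([gRow e n 1 0, gRow e n 1 1, gRow e n 0 2].set 2
        ((gRow e n 0 2).set 0 ((gRow e n 1 1).getD 0 0 + e 2 0))) = _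
      rw [gRow_getD e n 1 1 0 hk (by omega)]
      rw [show cval e 1 0 + e 2 0 = cval e 2 0 by simp [cval], gRow_set e n 0 2 hk]
      rfl
    | succ k' =>
      show ([gRow e n (k'+1+1) 0, gRow e n (k'+1+1) 1, gRow e n (k'+1) 2].set 2
        ((gRow e n (k'+1) 2).set (k'+1)
          (if (decide (k'+1 > 0) && (2 == 0)) = true then
            (gRow e n (k'+1) 2).getD (k'+1-1) 0 + e 2 (k'+1)
           else max ((gRow e n (k'+1+1) 1).getD (k'+1) 0) ((gRow e n (k'+1) 2).getD (k'+1-1) 0) + e 2 (k'+1)))) = _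
      rw [if_neg (by simp)]
      rw [show k'+1-1 = k' from rfl, gRow_getD e n (k'+1+1) 1 (k'+1) hk (by omega),
        gRow_getD e n (k'+1) 2 k' (by omega) (by omega)]
      rw [show max (cval e 1 (k'+1)) (cval e 2 k') + e 2 (k'+1) = cval e 2 (k'+1) by simp [cval],
        gRow_set e n (k'+1) 2 hk]
      rfl
  unfold aCol
  rw [hr]
  simp only [List.foldl_cons, List.foldl_nil]
  rw [h0, h1, h2]

theorem a_fold (e : Nat → Nat → Int) (n : Nat) (k : Nat) (hk : k ≤ n) :
    (List.range k).foldl (fun C j => aCol e j C) [gRow e n 0 0, gRow e n 0 1, gRow e n 0 2]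
    = [gRow e n k 0, gRow e n k 1, gRow e n k 2] := by
  induction k with
  | zero => simp
  | succ k ih =>
    rw [List.range_succ, List.foldl_append, ih (by omega)]
    simp only [List.foldl_cons, List.foldl_nil]
    exact a_col_step e n k (by omega)

theorem a_char (pi : List Int) (p : List (List Int)) :
    calculate_completion_times pi p =
      [ (List.range pi.length).map (cval (pvAt p pi) 0),
        (List.range pi.length).map (cval (pvAt p pi) 1),
        (List.range pi.length).map (cval (pvAt p pi) 2) ] := by
  show (List.range pi.length).foldl (fun C j => aCol (pvAt p pi) j C)
    ((List.range 3).map fun _ => (List.range pi.length).map fun _ => (0 : Int)) = _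
  have hg0 : ∀ i, gRow (pvAt p pi) pi.length 0 i = (List.range pi.length).map fun _ => (0 : Int) := by
    intro i; unfold gRow; apply List.map_congr_left; intro j hj; simp
  have hC0 : ((List.range 3).map fun _ => (List.range pi.length).map fun _ => (0 : Int))
      = [gRow (pvAt p pi) pi.length 0 0, gRow (pvAt p pi) pi.length 0 1, gRow (pvAt p pi) pi.length 0 2] := by
    rw [hg0 0, hg0 1, hg0 2]; rfl
  rw [hC0, a_fold (pvAt p pi) pi.length pi.length le_rfl]
  have hg : ∀ i, gRow (pvAt p pi) pi.length pi.length i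
      = (List.range pi.length).map (cval (pvAt p pi) i) := by
    intro i; unfold gRow; apply List.map_congr_left; intro j hj
    rw [if_pos (by simpa using hj)]
  rw [hg 0, hg 1, hg 2]

-- machine 0's completion times are the prefix sums
theorem cval_zero_eq_pvS (e : Nat → Nat → Int) : ∀ j, cval e 0 j = pvS e 0 j := by
  intro j
  induction j with
  | zero => simp [cval, pvS]
  | succ j ih => simp [cval, pvS, ih]

-- the closed form: C[i+1][j] = S_{i+1}[j] + max_{k≤j}(C[i][k] − S_{i+1}[k−1])
theorem cval_split (e : Nat → Nat → Int) (i : Nat) :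
    ∀ j, cval e (i + 1) j = pvS e (i + 1) j + pvM e i j := by
  intro j
  induction j with
  | zero => simp [cval, pvS, pvM]; ring
  | succ j ih =>
    rw [show cval e (i + 1) (j + 1)
      = max (cval e i (j + 1)) (cval e (i + 1) j) + e (i + 1) (j + 1) from by simp [cval]]
    rw [ih]
    simp only [pvS, pvM]
    rcases le_total (cval e i (j + 1) - pvS e (i + 1) j) (pvM e i j) with h | h
    · rw [if_neg (by omega), max_eq_right (by omega)]; ring
    · rcases eq_or_lt_of_le h with h' | h'
      · rw [h', if_neg (by omega), max_eq_right (by omega)]; ring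
      · rw [if_pos (by omega), max_eq_left (by omega)]; ring

theorem prefix_fold (e : Nat → Nat → Int) (i : Nat) (k : Nat) :
    (List.range k).foldl (fun (st : List Int × Int) j =>
      (st.1 ++ [st.2 + e i j], st.2 + e i j)) ([], 0)
    = ((List.range k).map (pvS e i), if k = 0 then 0 else pvS e i (k - 1)) := by
  induction k with
  | zero => simp
  | succ k ih =>
    rw [List.range_succ, List.foldl_append, ih]
    simp only [List.foldl_cons, List.foldl_nil]
    have hacc : (if k = 0 then 0 else pvS e i (k - 1)) + e i k = pvS e i k := by
      cases k with
      | zero => simp [pvS]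
      | succ k' => rw [if_neg (by omega)]; simp [pvS]
    rw [hacc, List.map_append]
    simp

theorem row_fold (e : Nat → Nat → Int) (i n : Nat) (k : Nat) (hk : k ≤ n) :
    (List.range k).foldl (fun (st : List Int × Option Int) j =>
      let cand := ((List.range n).map (cval e i)).getD j 0 -
        (if j > 0 then ((List.range n).map (pvS e (i + 1))).getD (j - 1) 0 else 0)
      let best := match st.2 with
        | none => cand
        | some b => if cand > b then cand else b
      (st.1 ++ [((List.range n).map (pvS e (i + 1))).getD j 0 + best], some best)) ([], none)
    = ((List.range k).map (cval e (i + 1)), if k = 0 then none else some (pvM e i (k - 1))) := by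
  induction k with
  | zero => simp
  | succ k ih =>
    rw [List.range_succ, List.foldl_append, ih (by omega)]
    simp only [List.foldl_cons, List.foldl_nil]
    have hS : ((List.range n).map (pvS e (i + 1))).getD k 0 = pvS e (i + 1) k := by
      rw [getD_map_range, if_pos (by omega)]
    have hc : ((List.range n).map (cval e i)).getD k 0 = cval e i k := by
      rw [getD_map_range, if_pos (by omega)]
    have hcell := cval_split e i k
    cases k with
    | zero =>
      simp only [hS, hc]
      simp only [pvM] at hcell
      simp_all [pvM]
      try omega
    | succ k' =>
      have hSprev : ((List.range n).map (pvS e (i + 1))).getD k' 0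
          = pvS e (i + 1) k' := by
        rw [getD_map_range, if_pos (by omega)]
      simp only [hS, hc, if_pos (show k' + 1 > 0 by omega),
        if_neg (show ¬ (k' + 1 = 0) by omega), Nat.add_sub_cancel, hSprev]
      have hM : (if cval e i (k' + 1) - pvS e (i + 1) k' > pvM e i k'
          then cval e i (k' + 1) - pvS e (i + 1) k' else pvM e i k')
          = pvM e i (k' + 1) := by
        simp [pvM]
      rw [hM, show pvS e (i + 1) (k' + 1) + pvM e i (k' + 1) = cval e (i + 1) (k' + 1) from hcell.symm]
      simp [List.range_succ]

theorem b_char (pi : List Int) (p : List (List Int)) :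
    calculate_completion_times_alt pi p =
      [ (List.range pi.length).map (cval (pvAt p pi) 0),
        (List.range pi.length).map (cval (pvAt p pi) 1),
        (List.range pi.length).map (cval (pvAt p pi) 2) ] := by
  have hpre : ∀ i, pvPrefix (pvAt p pi) i pi.length = (List.range pi.length).map (pvS (pvAt p pi) i) := by
    intro i
    unfold pvPrefix
    rw [prefix_fold]
  have hrow : ∀ i, pvRowFromPrev pi.length ((List.range pi.length).map (cval (pvAt p pi) i))
      ((List.range pi.length).map (pvS (pvAt p pi) (i + 1)))
      = (List.range pi.length).map (cval (pvAt p pi) (i + 1)) := by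
    intro i
    unfold pvRowFromPrev
    rw [row_fold (pvAt p pi) i pi.length pi.length le_rfl]
  have h0 : (List.range pi.length).map (pvS (pvAt p pi) 0)
      = (List.range pi.length).map (cval (pvAt p pi) 0) := by
    apply List.map_congr_left; intro j _; exact (cval_zero_eq_pvS (pvAt p pi) j).symm
  show (((List.range 3).foldl _ ([], none)).1 : List (List Int)) = _
  rw [show List.range 3 = [0, 1, 2] from rfl]
  simp only [List.foldl_cons, List.foldl_nil]
  rw [hpre 0, h0, hpre 1, hrow 0, hpre 2, hrow 1]
  simp

-- ===== VERDICT (by name: the statement is the Claim_ definition above) =====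
theorem calculate_completion_times_spec : Claim_equal_calculate_completion_times := by
  intro pi p _ _
  unfold Spec_calculate_completion_times
  rw [a_char, b_char]
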